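-- pv_equiv track=rewrite | github.com/Aranya5/LeetCode-Problems | 3315minBitwiseArray.py | find_min_array
-- ===== SOURCE A (Python) =====
-- def find_min_array(nums):
--     ans = []
--
--     for p in nums:
--         if p == 2:
--             ans.append(-1)
--             continue
--
--         # Count the number of trailing ones
--         # Example: 11 (1011) -> 2 trailing ones
--         temp = p
--         trailing_ones = 0
--         while (temp & 1):
--             trailing_ones += 1
--             temp >>= 1
--
--         # We flip the highest bit of the trailing ones sequence
--         # This corresponds to 2^(trailing_ones - 1)
--         subtractor = 1 << (trailing_ones - 1)
--
--         ans.append(p - subtractor)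
--
--     return ans
-- ===== SOURCE B (Python) =====
-- def find_min_array(nums):
--     # closed form: p ^ (p + 1) is a mask of (trailing-ones-of-p + 1) low bits, so its
--     # bit_length minus 1 is the trailing-ones count; no counting loop needed
--     return [-1 if p == 2 else p - (1 << ((p ^ (p + 1)).bit_length() - 2)) for p in nums]
-- ===== Notes on version B (the rewrite author's own statement) =====
-- stated objective: simpler
-- what changed: The bit-by-bit while loop that counts trailing ones (and its temp/counter state) is replaced by the closed form (p ^ (p + 1)).bit_length() - 1, turning the whole function into a single comprehension with no inner loop; the p == 2 case and the natural ValueError on other even elements are unchanged.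
import Mathlib
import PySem

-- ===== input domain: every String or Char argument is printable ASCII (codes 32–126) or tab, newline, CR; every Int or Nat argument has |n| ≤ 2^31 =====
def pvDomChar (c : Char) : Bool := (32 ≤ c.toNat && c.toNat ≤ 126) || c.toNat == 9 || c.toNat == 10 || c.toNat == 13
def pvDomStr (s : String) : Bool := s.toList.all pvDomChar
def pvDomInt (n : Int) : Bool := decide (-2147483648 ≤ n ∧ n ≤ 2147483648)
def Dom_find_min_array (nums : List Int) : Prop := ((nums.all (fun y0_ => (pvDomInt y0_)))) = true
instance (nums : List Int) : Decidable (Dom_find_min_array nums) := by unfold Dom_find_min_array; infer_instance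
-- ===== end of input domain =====

-- B replaces A's inner trailing-ones counting loop by the closed form
-- (p ^ (p+1)).bit_length() - 1, making the function a single comprehension (simpler, no inner loop).


-- ===== PORT A =====
-- A's inner `while (temp & 1): trailing_ones += 1; temp >>= 1`, with fuel making the
-- recursion total (Python diverges here on negative odd temp; those inputs are outside Pre_;
-- 64 fuel is never exhausted on the |n| ≤ 2^31 domain).
def pvLoopA (fuel : Nat) (temp : Int) (trailing_ones : Int) : Int :=
  match fuel with
  | 0 => trailing_ones
  | f + 1 =>
      if PySem.Int.band temp 1 ≠ 0 then pvLoopA f (temp >>> (1 : Nat)) (trailing_ones + 1)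
      else trailing_ones

def find_min_array (nums : List Int) : List Int :=
  nums.foldl (fun ans p =>
    if p = 2 then ans ++ [-1]
    else
      let trailing_ones := pvLoopA 64 p 0
      -- Python's `1 << (trailing_ones - 1)` raises ValueError when trailing_ones = 0;
      -- those inputs are excluded by Pre_ (the .toNat clamp is only reached outside Pre_).
      let subtractor := (1 : Int) <<< (trailing_ones - 1).toNat
      ans ++ [p - subtractor]) []

-- ===== PORT B =====
-- `1 << ((p ^ (p+1)).bit_length() - 2)` raises ValueError in Python when the shift count is
-- negative (even p ≠ 2); those inputs are outside Pre_ (the .toNat clamp is only reached there).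
def find_min_array_alt (nums : List Int) : List Int :=
  nums.map (fun p =>
    if p = 2 then -1
    else p - (1 : Int) <<< ((PySem.Int.bitLength (PySem.Int.bxor p (p + 1)) : Int) - 2).toNat)

-- ===== PRECONDITION & SPEC =====
-- Pre_ is exactly A's domain of normal return: every element is 2 or odd positive
-- (even elements ≠ 2 make A raise ValueError via `1 << -1`; negative odd elements make
-- A's while loop run forever).
def Pre_find_min_array (nums : List Int) : Prop :=
  ∀ p ∈ nums, p = 2 ∨ (0 < p ∧ p % 2 = 1)
instance (nums : List Int) : Decidable (Pre_find_min_array nums) := by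
  unfold Pre_find_min_array; infer_instance

def pvWitness_find_min_array : List Int := [3, 2, 7, 11, 2147483647]

def Spec_find_min_array (nums : List Int) (out : List Int) : Prop := out = find_min_array_alt nums
instance (nums : List Int) (out : List Int) : Decidable (Spec_find_min_array nums out) := by unfold Spec_find_min_array; infer_instance

-- ===== CLAIM (what is proved, stated in full; the proofs are below) =====
def Claim_equal_find_min_array : Prop := ∀ (nums : List Int), Dom_find_min_array nums → Pre_find_min_array nums → Spec_find_min_array nums (find_min_array nums)

-- ===== LEMMAS AND PROOFS =====

-- Nat-level trailing-ones counter mirroring pvLoopA's recursion.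
def pvTC : Nat → Nat → Nat
  | 0, _ => 0
  | f + 1, n => if n % 2 = 1 then pvTC f (n / 2) + 1 else 0

theorem pvLoopA_natCast (f : Nat) : ∀ (n : Nat) (tr : Int),
    pvLoopA f (n : Int) tr = tr + (pvTC f n : Int) := by
  induction f with
  | zero => intro n tr; simp [pvLoopA, pvTC]
  | succ f ih =>
      intro n tr
      have hband : PySem.Int.band (n : Int) 1 = ((n % 2 : Nat) : Int) := by
        have := PySem.Int.band_natCast n 1
        simpa [Nat.and_one_is_mod] using this
      have hshift : (n : Int) >>> (1 : Nat) = ((n / 2 : Nat) : Int) := by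
        change Int.shiftRight (Int.ofNat n) 1 = _
        simp [Int.shiftRight, Nat.shiftRight_succ, Nat.shiftRight_zero]
      by_cases h : n % 2 = 1
      · have hcond : PySem.Int.band (n : Int) 1 ≠ 0 := by rw [hband, h]; decide
        rw [show pvLoopA (f+1) (n : Int) tr
              = if PySem.Int.band (n : Int) 1 ≠ 0 then pvLoopA f ((n : Int) >>> (1:Nat)) (tr + 1) else tr from rfl,
            if_pos hcond, hshift, ih (n / 2) (tr + 1),
            show pvTC (f+1) n = pvTC f (n / 2) + 1 from by simp [pvTC, h]]
        push_cast; ring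
      · have hcond : ¬ PySem.Int.band (n : Int) 1 ≠ 0 := by
          rw [hband, show n % 2 = 0 from by omega]; decide
        rw [show pvLoopA (f+1) (n : Int) tr
              = if PySem.Int.band (n : Int) 1 ≠ 0 then pvLoopA f ((n : Int) >>> (1:Nat)) (tr + 1) else tr from rfl,
            if_neg hcond,
            show pvTC (f+1) n = 0 from by simp [pvTC, h]]
        simp

-- xor bit-doubling lemmas (Nat level)
theorem pvXor_two_mul_add_one (a b : Nat) : (2 * a + 1) ^^^ (2 * b) = 2 * (a ^^^ b) + 1 := by
  have := Nat.bitwise_bit (f := bne) (a := true) (m := a) (b := false) (n := b) rfl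
  simpa [Nat.bit, HXor.hXor, XorOp.xor, Nat.xor, Nat.two_mul, mul_comm, two_mul] using this

theorem pvXor_two_mul (a b : Nat) : (2 * a) ^^^ (2 * b + 1) = 2 * (a ^^^ b) + 1 := by
  have := Nat.bitwise_bit (f := bne) (a := false) (m := a) (b := true) (n := b) rfl
  simpa [Nat.bit, HXor.hXor, XorOp.xor, Nat.xor, Nat.two_mul, mul_comm, two_mul] using this

-- main Nat lemma: for odd n < 2^f, n ^^^ (n+1) is the all-ones mask of (tc + 1) bits
theorem pvXor_eq_pow (f : Nat) : ∀ n : Nat, n % 2 = 1 → n < 2 ^ f →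
    n ^^^ (n + 1) = 2 ^ (pvTC f n + 1) - 1 := by
  induction f with
  | zero => intro n hodd hlt; omega
  | succ f ih =>
      intro n hodd hlt
      obtain ⟨k, rfl⟩ : ∃ k, n = 2 * k + 1 := ⟨n / 2, by omega⟩
      have hstep : (2 * k + 1) ^^^ (2 * k + 1 + 1) = 2 * (k ^^^ (k + 1)) + 1 := by
        have h2 : 2 * k + 1 + 1 = 2 * (k + 1) := by ring
        rw [h2, pvXor_two_mul_add_one]
      have htc : pvTC (f + 1) (2 * k + 1) = pvTC f k + 1 := by
        have hd : (2 * k + 1) / 2 = k := by omega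
        simp [pvTC, hd]
      by_cases hk : k % 2 = 1
      · have hklt : k < 2 ^ f := by
          have := Nat.pow_succ 2 f; omega
        have ihk := ih k hk hklt
        rw [hstep, ihk, htc]
        have h1 : 1 ≤ 2 ^ (pvTC f k + 1) := Nat.one_le_two_pow
        rw [pow_succ]
        omega
      · obtain ⟨j, rfl⟩ : ∃ j, k = 2 * j := ⟨k / 2, by omega⟩
        have h1 : (2 * j) ^^^ (2 * j + 1) = 1 := by
          rw [pvXor_two_mul, Nat.xor_self]
        have htck : pvTC f (2 * j) = 0 := by
          cases f with
          | zero => simp [pvTC]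
          | succ f => simp [pvTC, Nat.mul_mod_right]
        rw [hstep, h1, htc, htck]
        norm_num

-- bitLength of the all-ones mask
theorem pvBitLen_mask (t : Nat) :
    PySem.Int.bitLength (((2 ^ (t + 1) - 1 : Nat) : Int)) = t + 1 := by
  set m : Nat := 2 ^ (t + 1) - 1 with hm
  have hmpos : 0 < m := by
    have : 2 ≤ 2 ^ (t + 1) := Nat.le_self_pow (by omega) 2
    omega
  have h1 := PySem.Int.lt_two_pow_bitLength ((m : Nat) : Int)
  have h2 := PySem.Int.two_pow_bitLength_le ((m : Nat) : Int) (by exact_mod_cast hmpos.ne')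
  rw [Int.natAbs_natCast] at h1 h2
  set L := PySem.Int.bitLength ((m : Nat) : Int) with hL
  have hub : 2 ^ (t + 1) ≤ 2 ^ L := by omega
  have hge : t + 1 ≤ L := (Nat.pow_le_pow_iff_right (by omega)).mp hub
  have hlb : 2 ^ (L - 1) < 2 ^ (t + 1) := by omega
  have hle : L - 1 < t + 1 := (Nat.pow_lt_pow_iff_right (by omega)).mp hlb
  omega

-- per-element equality on the precondition
theorem pvElem_eq (p : Int) (hdom : pvDomInt p = true) (hp : 0 < p) (hodd : p % 2 = 1) :
    p - (1 : Int) <<< ((pvLoopA 64 p 0) - 1).toNat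
      = p - (1 : Int) <<< ((PySem.Int.bitLength (PySem.Int.bxor p (p + 1)) : Int) - 2).toNat := by
  obtain ⟨n, rfl⟩ : ∃ n : Nat, p = (n : Int) := ⟨p.toNat, by omega⟩
  have hn : n % 2 = 1 := by omega
  have hlt : n < 2 ^ 64 := by
    simp [pvDomInt] at hdom
    have h64 : (2:Nat) ^ 64 = 18446744073709551616 := by norm_num
    omega
  have hcount := pvLoopA_natCast 64 n 0
  set t := pvTC 64 n with ht
  have ht1 : 1 ≤ t := by
    have : pvTC 64 n = pvTC 63 (n / 2) + 1 := by simp [pvTC, hn]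
    omega
  have hxor : PySem.Int.bxor (n : Int) ((n : Int) + 1) = ((2 ^ (t + 1) - 1 : Nat) : Int) := by
    have hcast : ((n : Int) + 1) = ((n + 1 : Nat) : Int) := by push_cast; ring
    rw [hcast, PySem.Int.bxor_natCast, pvXor_eq_pow 64 n hn hlt]
  rw [hcount, hxor, pvBitLen_mask]
  have e1 : ((0 + (t : Int)) - 1).toNat = t - 1 := by omega
  have e2 : (((t + 1 : Nat) : Int) - 2).toNat = t - 1 := by push_cast; omega
  rw [e1, e2]

-- fold/map bridge
theorem pvFold_eq_map (nums : List Int)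
    (h : ∀ p ∈ nums, pvDomInt p = true ∧ (p = 2 ∨ (0 < p ∧ p % 2 = 1))) :
    ∀ ans : List Int,
      nums.foldl (fun ans p =>
        if p = 2 then ans ++ [-1]
        else ans ++ [p - (1 : Int) <<< ((pvLoopA 64 p 0) - 1).toNat]) ans
      = ans ++ nums.map (fun p =>
          if p = 2 then -1
          else p - (1 : Int) <<< ((PySem.Int.bitLength (PySem.Int.bxor p (p + 1)) : Int) - 2).toNat) := by
  induction nums with
  | nil => intro ans; simp
  | cons p rest ih =>
      intro ans
      obtain ⟨hd, hpre⟩ := h p (List.mem_cons_self ..)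
      have hrest : ∀ q ∈ rest, pvDomInt q = true ∧ (q = 2 ∨ (0 < q ∧ q % 2 = 1)) :=
        fun q hq => h q (List.mem_cons_of_mem _ hq)
      by_cases h2 : p = 2
      · simp only [List.foldl_cons, List.map_cons, h2, if_true, ih hrest]
        simp
      · rcases hpre with h2' | ⟨hp, hodd⟩
        · exact absurd h2' h2
        simp only [List.foldl_cons, List.map_cons, h2, if_false, ih hrest]
        rw [pvElem_eq p hd hp hodd]
        simp

-- ===== VERDICT (by name: the statement is the Claim_ definition above) =====
theorem find_min_array_spec : Claim_equal_find_min_array := by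
  intro nums hdom hpre
  unfold Spec_find_min_array find_min_array find_min_array_alt
  have h : ∀ p ∈ nums, pvDomInt p = true ∧ (p = 2 ∨ (0 < p ∧ p % 2 = 1)) := by
    intro p hp
    refine ⟨?_, hpre p hp⟩
    unfold Dom_find_min_array at hdom
    simpa using (List.all_eq_true.mp hdom p hp)
  simpa using pvFold_eq_map nums h []
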